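-- pv_equiv track=rewrite | github.com/VladaLukovskaya/eco_calculator | edit_text.py | edit_code
-- ===== SOURCE A (Python) =====
-- def edit_code(code):  # если полученный код правильный, приводим его к нужному виду, иначе оставляем
--     if len(code) == 11:
--         new_code = code[:]
--         code = [' ' for i in range(16)]
--         code[0] = new_code[0]
--         code[2] = new_code[1]
--         code[3] = new_code[2]
--         code[5] = new_code[3]
--         code[6] = new_code[4]
--         code[7] = new_code[5]
--         code[9] = new_code[6]
--         code[10] = new_code[7]
--         code[12] = new_code[8]
--         code[13] = new_code[9]
--         code[15] = new_code[10]
--         code = ''.join(code)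
--     else:
--         code = str(code)  # в таком виде неправильный код будет сразу заметен в документе
--     return code
-- ===== SOURCE B (Python) =====
-- def edit_code(code):
--     if len(code) == 11:
--         return ' '.join([code[0:1], code[1:3], code[3:6], code[6:8], code[8:10], code[10:11]])
--     return str(code)
-- ===== Notes on version B (the rewrite author's own statement) =====
-- stated objective: idiomatic
-- what changed: B slices the 11-char code into its six groups and joins them with single spaces, instead of A's scatter of single characters into a 16-slot list pre-filled with spaces.
import Mathlib
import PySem

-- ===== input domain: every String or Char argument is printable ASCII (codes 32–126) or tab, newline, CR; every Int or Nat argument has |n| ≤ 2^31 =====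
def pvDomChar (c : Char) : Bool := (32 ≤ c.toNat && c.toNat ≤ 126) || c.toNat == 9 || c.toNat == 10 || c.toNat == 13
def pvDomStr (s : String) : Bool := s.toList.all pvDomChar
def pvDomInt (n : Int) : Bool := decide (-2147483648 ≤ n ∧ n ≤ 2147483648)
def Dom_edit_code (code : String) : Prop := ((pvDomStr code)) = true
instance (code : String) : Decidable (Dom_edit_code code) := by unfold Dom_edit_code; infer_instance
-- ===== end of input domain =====

-- B reformats the 11-char code by slicing it into its six groups and ' '.join-ing them,
-- instead of A's scatter of single characters into a 16-slot list of spaces (objective: idiomatic).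

-- ===== PORT A =====
def edit_code (code : String) : String :=
  if PySem.Str.len code = 11 then
    -- new_code = code[:]  (work on the code points, as Python indexes the string)
    let new_code := code.toList
    -- code = [' ' for i in range(16)]
    let c := List.replicate 16 ' '
    -- the eleven assignments code[j] = new_code[i]; indices are in range since len = 11
    let c := c.set 0  (new_code.getD 0 ' ')
    let c := c.set 2  (new_code.getD 1 ' ')
    let c := c.set 3  (new_code.getD 2 ' ')
    let c := c.set 5  (new_code.getD 3 ' ')
    let c := c.set 6  (new_code.getD 4 ' ')
    let c := c.set 7  (new_code.getD 5 ' ')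
    let c := c.set 9  (new_code.getD 6 ' ')
    let c := c.set 10 (new_code.getD 7 ' ')
    let c := c.set 12 (new_code.getD 8 ' ')
    let c := c.set 13 (new_code.getD 9 ' ')
    let c := c.set 15 (new_code.getD 10 ' ')
    -- code = ''.join(code)
    String.ofList c
  else
    -- str(code) on a str is the string itself
    code

-- ===== PORT B =====
def edit_code_alt (code : String) : String :=
  if PySem.Str.len code = 11 then
    PySem.Str.join " " [PySem.Str.slice code (some 0) (some 1),
                        PySem.Str.slice code (some 1) (some 3),
                        PySem.Str.slice code (some 3) (some 6),
                        PySem.Str.slice code (some 6) (some 8),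
                        PySem.Str.slice code (some 8) (some 10),
                        PySem.Str.slice code (some 10) (some 11)]
  else
    code

-- ===== PRECONDITION & SPEC =====
def Spec_edit_code (code : String) (out : String) : Prop := out = edit_code_alt code
instance (code : String) (out : String) : Decidable (Spec_edit_code code out) := by unfold Spec_edit_code; infer_instance

-- ===== CLAIM (what is proved, stated in full; the proofs are below) =====
def Claim_equal_edit_code : Prop := ∀ (code : String), Dom_edit_code code → Spec_edit_code code (edit_code code)

-- ===== LEMMAS AND PROOFS =====

theorem pv_len11 (l : List Char) (h : l.length = 11) :
    ∃ a b c d e f g h' i j k, l = [a,b,c,d,e,f,g,h',i,j,k] := by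
  match l, h with
  | [a,b,c,d,e,f,g,h',i,j,k], _ => exact ⟨a,b,c,d,e,f,g,h',i,j,k,rfl⟩

-- ===== VERDICT (by name: the statement is the Claim_ definition above) =====
theorem edit_code_spec : Claim_equal_edit_code := by
  intro code _
  unfold Spec_edit_code edit_code edit_code_alt
  by_cases h : PySem.Str.len code = 11
  · simp only [PySem.Str.len] at h
    have hl : code.toList.length = 11 := by exact_mod_cast h
    obtain ⟨a,b,c,d,e,f,g,h',i,j,k,hL⟩ := pv_len11 _ hl
    apply String.toList_injective
    simp [hL, PySem.Str.toList_join, PySem.Chars.join, PySem.Str.slice, PySem.Chars.slice,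
          PySem.List.slice, PySem.List.clampIdx, List.intercalate, List.intersperse]
  · have h2 : ¬ ((code.length : Int) = 11) := by
      simp only [PySem.Str.len] at h; simpa using h
    simp [h2]
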